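-- pv_equiv track=rewrite | github.com/angelricardoh/Python-Algorithms | job_interviews/capital_one.py | boundedRatio
-- ===== SOURCE A (Python) =====
-- def boundedRatio(a, l, r):
--     result = []
--     for i, element in enumerate(a):
--         satisfies = False
--         for x in range(l, r + 1):
--             if (i + 1) * x == element:
--                 satisfies = True
--                 break
--         result.append(satisfies)
--
--     return result
-- ===== SOURCE B (Python) =====
-- def boundedRatio(a, l, r):
--     # Divisibility test per index: (i+1)*x == element for some x in [l, r]
--     # iff element is divisible by i+1 and the quotient lies in [l, r].
--     return [e % d == 0 and l <= e // d <= r for d, e in enumerate(a, 1)]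
-- ===== Notes on version B (the rewrite author's own statement) =====
-- stated objective: alternative
-- what changed: Replaced the inner scan over every x in [l, r] by a single divisibility test e % (i+1) == 0 with a quotient range check.
import Mathlib
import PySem

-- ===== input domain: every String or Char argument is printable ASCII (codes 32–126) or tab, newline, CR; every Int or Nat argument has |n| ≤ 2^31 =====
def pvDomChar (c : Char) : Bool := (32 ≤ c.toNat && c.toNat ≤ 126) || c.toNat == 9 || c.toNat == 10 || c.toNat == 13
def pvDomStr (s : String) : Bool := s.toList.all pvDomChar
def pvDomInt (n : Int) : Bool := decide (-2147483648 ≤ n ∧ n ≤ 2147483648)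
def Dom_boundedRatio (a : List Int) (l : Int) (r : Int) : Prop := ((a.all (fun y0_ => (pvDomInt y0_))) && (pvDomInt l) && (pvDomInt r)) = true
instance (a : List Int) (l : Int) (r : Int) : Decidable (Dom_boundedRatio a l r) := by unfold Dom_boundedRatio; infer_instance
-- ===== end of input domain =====

-- B replaces A's inner scan over range(l, r+1) with a single divisibility test per element.

-- ===== PORT A =====
-- inner loop 'for x in range(l, r+1): if (i+1)*x == element: satisfies = True; break'
-- ported as a recursive scan from lo upward with early exit, exactly Python's break semantics
def boundedRatioInner (d e : Int) (lo hi : Int) : Bool :=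
  if _h : lo < hi then
    if d * lo = e then true else boundedRatioInner d e (lo + 1) hi
  else false
termination_by (hi - lo).toNat
decreasing_by omega

def boundedRatioGoA (l r : Int) (i : Int) : List Int → List Bool
  | [] => []
  | e :: rest =>
      boundedRatioInner (i + 1) e l (r + 1) :: boundedRatioGoA l r (i + 1) rest

def boundedRatio (a : List Int) (l : Int) (r : Int) : List Bool :=
  boundedRatioGoA l r 0 a

-- ===== PORT B =====
def boundedRatioGoB (l r : Int) (d : Int) : List Int → List Bool
  | [] => []
  | e :: rest =>
      (decide (PySem.Int.mod e d = 0) && decide (l ≤ PySem.Int.floordiv e d)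
        && decide (PySem.Int.floordiv e d ≤ r))
        :: boundedRatioGoB l r (d + 1) rest

def boundedRatio_alt (a : List Int) (l : Int) (r : Int) : List Bool :=
  boundedRatioGoB l r 1 a

-- ===== PRECONDITION & SPEC =====
def Spec_boundedRatio (a : List Int) (l : Int) (r : Int) (out : List Bool) : Prop := out = boundedRatio_alt a l r
instance (a : List Int) (l : Int) (r : Int) (out : List Bool) : Decidable (Spec_boundedRatio a l r out) := by unfold Spec_boundedRatio; infer_instance

-- ===== CLAIM (what is proved, stated in full; the proofs are below) =====
def Claim_equal_boundedRatio : Prop := ∀ (a : List Int) (l : Int) (r : Int), Dom_boundedRatio a l r → Spec_boundedRatio a l r (boundedRatio a l r)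

-- ===== LEMMAS AND PROOFS =====

-- the break-scan succeeds iff some x in [lo, hi) satisfies d * x = e
lemma pv_inner_iff (d e : Int) : ∀ (lo hi : Int),
    boundedRatioInner d e lo hi = true ↔ ∃ x, lo ≤ x ∧ x < hi ∧ d * x = e := by
  intro lo hi
  fun_induction boundedRatioInner d e lo hi with
  | case1 lo h hx => simp only [true_iff]; exact ⟨lo, le_refl lo, h, hx⟩
  | case2 lo h hx ih =>
      rw [ih]
      constructor
      · rintro ⟨x, h1, h2, h3⟩; exact ⟨x, by omega, h2, h3⟩
      · rintro ⟨x, h1, h2, h3⟩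
        refine ⟨x, ?_, h2, h3⟩
        rcases eq_or_lt_of_le h1 with rfl | h'
        · exact absurd h3 hx
        · omega
  | case3 lo h =>
      simp only [Bool.false_eq_true, false_iff]
      rintro ⟨x, h1, h2, _⟩; omega

-- one element: the range scan succeeds iff the divisibility test succeeds (d > 0)
lemma pv_elem_eq (l r d e : Int) (hd : 0 < d) :
    boundedRatioInner d e l (r + 1)
      = (decide (PySem.Int.mod e d = 0) && decide (l ≤ PySem.Int.floordiv e d)
          && decide (PySem.Int.floordiv e d ≤ r)) := by
  rw [PySem.Int.mod_eq_emod_of_pos hd, PySem.Int.floordiv_eq_ediv_of_pos hd]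
  rw [Bool.eq_iff_iff]
  simp only [Bool.and_eq_true, decide_eq_true_eq]
  rw [pv_inner_iff]
  constructor
  · rintro ⟨x, hl, hr, hx⟩
    have hdiv : e / d = x := by
      rw [← hx]; exact Int.mul_ediv_cancel_left x hd.ne'
    refine ⟨⟨by rw [← hx]; simp [Int.mul_emod_right], by omega⟩, by omega⟩
  · rintro ⟨⟨hm, hl⟩, hr⟩
    obtain ⟨x, hx⟩ := Int.dvd_of_emod_eq_zero hm
    have hdiv : e / d = x := by rw [hx]; exact Int.mul_ediv_cancel_left x hd.ne'
    exact ⟨x, by omega, by omega, hx.symm⟩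

lemma pv_go_eq (l r : Int) : ∀ (xs : List Int) (i : Int), 0 ≤ i →
    boundedRatioGoA l r i xs = boundedRatioGoB l r (i + 1) xs := by
  intro xs
  induction xs with
  | nil => intro i _; rfl
  | cons e rest ih =>
      intro i hi
      simp only [boundedRatioGoA, boundedRatioGoB]
      rw [pv_elem_eq l r (i + 1) e (by omega), ih (i + 1) (by omega)]

-- ===== VERDICT (by name: the statement is the Claim_ definition above) =====
theorem boundedRatio_spec : Claim_equal_boundedRatio := by
  intro a l r _
  show boundedRatio a l r = boundedRatio_alt a l r
  unfold boundedRatio boundedRatio_alt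
  rw [pv_go_eq l r a 0 le_rfl]; norm_num
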